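-- pv_equiv track=rewrite | github.com/Countdown369/kimberling-shuffle | playground2.py | genNextRILI
-- ===== SOURCE A (Python) =====
-- import math
--
-- def genNextRILI(inrow, stage):
--     nextrow = []
--     cap = 2 * (stage - 1)
--
--     if stage == 1:
--         cap = 1
--
--     for x in range(cap):
--         if x % 2 == 0:
--             nextrow.append(inrow[(stage-1) + math.ceil((x+1)/2)])
--         else:
--             nextrow.append(inrow[(stage-1) - math.ceil((x+1)/2)])
--     for y in inrow[(stage+math.ceil(cap/2)):]:
--         nextrow.append(y)
--     return(nextrow)
-- ===== SOURCE B (Python) =====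
-- def genNextRILI(inrow, stage):
--     # Slice out the two runs once (no per-element index arithmetic), then
--     # consume the left part as a stack while walking the right part.
--     cap = 1 if stage == 1 else 2 * (stage - 1)
--     half_up = (cap + 1) // 2            # ceil(cap/2)
--     nR = max(half_up, 0)
--     nL = max(cap - half_up, 0)          # floor(cap/2), clamped
--     right = inrow[stage:stage + nR]
--     stack = inrow[stage - 1 - nL:stage - 1]
--     out = []
--     for r in right:
--         out.append(r)
--         if stack:
--             out.append(stack.pop())
--     return out + inrow[stage + half_up:]
-- ===== Notes on version B (the rewrite author's own statement) =====
-- stated objective: alternative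
-- what changed: B slices the row once into a rightward run, a left prefix used as a stack, and the untouched tail, then builds the output by popping the stack while walking the right run - no per-element index arithmetic, parity test or math.ceil, where A computes a wrapped index with ceil((x+1)/2) at every loop step.
import Mathlib
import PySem

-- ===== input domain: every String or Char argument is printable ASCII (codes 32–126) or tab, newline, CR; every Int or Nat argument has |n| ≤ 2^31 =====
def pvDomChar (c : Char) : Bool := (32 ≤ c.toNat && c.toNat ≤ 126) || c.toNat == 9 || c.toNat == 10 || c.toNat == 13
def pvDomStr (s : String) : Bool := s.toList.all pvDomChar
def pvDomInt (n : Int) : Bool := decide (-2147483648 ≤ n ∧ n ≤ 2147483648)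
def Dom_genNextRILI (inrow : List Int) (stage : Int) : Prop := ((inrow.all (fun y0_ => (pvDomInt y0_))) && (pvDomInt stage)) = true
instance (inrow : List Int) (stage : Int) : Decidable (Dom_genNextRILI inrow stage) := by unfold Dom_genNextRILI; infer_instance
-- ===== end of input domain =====

-- B slices the row into a right run, a left prefix consumed as a stack, and the tail; same cost, different decomposition.


-- ===== PORT A =====
-- math.ceil(n/2) on an int n: exact as integer ceiling division (floats are exact for |n| ≤ 2^32 here)
def pyCeilHalf (n : Int) : Int := -(PySem.Int.floordiv (-n) 2)

def genNextRILI (inrow : List Int) (stage : Int) : List Int :=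
  let cap : Int := if stage = 1 then 1 else 2 * (stage - 1)
  let nextrow : List Int :=
    (PySem.List.pyRange 0 cap 1).foldl (fun nextrow x =>
      if PySem.Int.mod x 2 = 0 then
        nextrow ++ [PySem.List.pyGetD inrow ((stage - 1) + pyCeilHalf (x + 1)) 0]
      else
        nextrow ++ [PySem.List.pyGetD inrow ((stage - 1) - pyCeilHalf (x + 1)) 0]) []
  -- second loop just appends every element of the tail slice
  nextrow ++ PySem.List.slice inrow (some (stage + pyCeilHalf cap)) none

-- ===== PORT B =====
def genNextRILI_alt (inrow : List Int) (stage : Int) : List Int :=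
  let cap : Int := if stage = 1 then 1 else 2 * (stage - 1)
  let halfUp : Int := PySem.Int.floordiv (cap + 1) 2
  let nR : Int := max halfUp 0
  let nL : Int := max (cap - halfUp) 0
  let right : List Int := PySem.List.slice inrow (some stage) (some (stage + nR))
  let stack : List Int := PySem.List.slice inrow (some (stage - 1 - nL)) (some (stage - 1))
  let res : List Int × List Int :=
    right.foldl (fun p r =>
      if p.2.isEmpty then (p.1 ++ [r], p.2)
      else (p.1 ++ [r, p.2.getLastD 0], p.2.dropLast)) ([], stack)
  res.1 ++ PySem.List.slice inrow (some (stage + halfUp)) none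

-- ===== PRECONDITION & SPEC =====
-- Pre_ excludes exactly the inputs where A raises IndexError: stage = 1 needs inrow[1],
-- and stage ≥ 2 reads indices 0..stage-2 and stage..2*stage-2; for stage ≤ 0 nothing is indexed.
def Pre_genNextRILI (inrow : List Int) (stage : Int) : Prop :=
  stage ≤ 0 ∨ (stage = 1 ∧ 2 ≤ (inrow.length : Int)) ∨ (2 ≤ stage ∧ 2 * stage - 1 ≤ (inrow.length : Int))
instance (inrow : List Int) (stage : Int) : Decidable (Pre_genNextRILI inrow stage) := by unfold Pre_genNextRILI; infer_instance
def pvWitness_genNextRILI : List Int × Int := ([10, 11, 12], 2)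

def Spec_genNextRILI (inrow : List Int) (stage : Int) (out : List Int) : Prop := out = genNextRILI_alt inrow stage
instance (inrow : List Int) (stage : Int) (out : List Int) : Decidable (Spec_genNextRILI inrow stage out) := by unfold Spec_genNextRILI; infer_instance

-- ===== CLAIM (what is proved, stated in full; the proofs are below) =====
def Claim_equal_genNextRILI : Prop := ∀ (inrow : List Int) (stage : Int), Dom_genNextRILI inrow stage → Pre_genNextRILI inrow stage → Spec_genNextRILI inrow stage (genNextRILI inrow stage)

-- ===== LEMMAS AND PROOFS =====

-- ceiling halving equals floor of the successor half
lemma ceilHalf_eq (n : Int) : pyCeilHalf n = PySem.Int.floordiv (n + 1) 2 := by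
  unfold pyCeilHalf
  rw [PySem.Int.floordiv_eq_ediv_of_pos (by omega), PySem.Int.floordiv_eq_ediv_of_pos (by omega)]
  omega

-- A's loop: fold of conditional appends is a map
lemma foldl_if_append {a b : Type} (p : a -> Prop) [DecidablePred p] (u v : a -> b)
    (l : List a) (acc : List b) :
    l.foldl (fun ac x => if p x then ac ++ [u x] else ac ++ [v x]) acc
      = acc ++ l.map (fun x => if p x then u x else v x) := by
  induction l generalizing acc with
  | nil => simp
  | cons y ys ih => by_cases h : p y <;> simp [h, ih]

-- the interleaving identity: A's parity walk over range(2k) is the zip-flatten of the two runs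
lemma interleave_core {a : Type} (s : Int) (f : Int -> a) (k : Nat) :
    (List.range (2 * k)).map (fun (x : Nat) =>
        if PySem.Int.mod (x : Int) 2 = 0 then f (s - 1 + pyCeilHalf ((x : Int) + 1))
        else f (s - 1 - pyCeilHalf ((x : Int) + 1)))
      = (List.range k).flatMap (fun (j : Nat) => [f (s + (j : Int)), f (s - 2 - (j : Int))]) := by
  induction k with
  | zero => simp
  | succ k ih =>
    have h2 : 2 * (k + 1) = (2 * k) + 1 + 1 := by omega
    rw [h2, List.range_succ, List.range_succ, List.range_succ]
    simp only [List.map_append, List.flatMap_append, ih, List.map_cons, List.map_nil,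
      List.flatMap_cons, List.flatMap_nil, List.append_nil]
    have hmod0 : PySem.Int.mod ((2 * k : Nat) : Int) 2 = 0 := by
      rw [PySem.Int.mod_eq_emod_of_pos (by omega)]; omega
    have hmod1 : PySem.Int.mod ((2 * k + 1 : Nat) : Int) 2 = 1 := by
      rw [PySem.Int.mod_eq_emod_of_pos (by omega)]; omega
    have e0 : s - 1 + pyCeilHalf (((2 * k : Nat) : Int) + 1) = s + (k : Int) := by
      rw [ceilHalf_eq, PySem.Int.floordiv_eq_ediv_of_pos (by omega)]; omega
    have e1 : s - 1 - pyCeilHalf (((2 * k + 1 : Nat) : Int) + 1) = s - 2 - (k : Int) := by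
      rw [ceilHalf_eq, PySem.Int.floordiv_eq_ediv_of_pos (by omega)]; omega
    simp only [hmod0, hmod1, e0, e1]
    norm_num

-- the interleaving B's stack walk produces
def riffle : List Int → List Int → List Int
  | [], _ => []
  | r :: rs, [] => r :: rs
  | r :: rs, l :: ls => r :: l :: riffle rs ls
lemma riffle_nil (R : List Int) : riffle R [] = R := by cases R <;> rfl
lemma fold_riffle (R : List Int) (T acc : List Int) :
    (R.foldl (fun (p : List Int × List Int) r =>
        if p.2.isEmpty then (p.1 ++ [r], p.2)
        else (p.1 ++ [r, p.2.getLastD 0], p.2.dropLast)) (acc, T)).1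
      = acc ++ riffle R T.reverse := by
  induction R generalizing T acc with
  | nil => simp [riffle]
  | cons r rs ih =>
    rcases List.eq_nil_or_concat T with hT | ⟨T', t, rfl⟩
    · subst hT
      simp only [List.foldl_cons, List.isEmpty_nil, if_true, ih, List.reverse_nil, riffle_nil]
      simp
    · simp only [List.concat_eq_append, List.foldl_cons]
      rw [if_neg (by simp)]
      simp only [List.getLastD_concat, List.dropLast_concat, ih, List.reverse_append,
        List.reverse_cons, List.reverse_nil, List.nil_append, List.cons_append]
      simp [riffle]
lemma riffle_zip (L1 L2 : List Int) (h : L1.length = L2.length) :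
    riffle L1 L2 = (L1.zip L2).flatMap (fun p => [p.1, p.2]) := by
  induction L1 generalizing L2 with
  | nil => simp [riffle]
  | cons x xs ih =>
    cases L2 with
    | nil => simp at h
    | cons y ys => simp [riffle, ih ys (by simpa using h)]

lemma slice_eq_map_range (xs : List Int) (a : Int) (k : Nat) (ha : 0 ≤ a)
    (hk : a + k ≤ (xs.length : Int)) :
    PySem.List.slice xs (some a) (some (a + k)) =
      (List.range k).map (fun (j : Nat) => PySem.List.pyGetD xs (a + (j : Int)) 0) := by
  rw [PySem.List.slice_toNat xs ha (by omega)]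
  apply List.ext_getElem
  · simp; omega
  · intro i h1 h2
    have hik : i < k := by simpa using h2
    rw [List.getElem_take, List.getElem_drop, List.getElem_map, List.getElem_range]
    simp only [show a.toNat + i = (a + (i:Int)).toNat from by omega]
    rw [PySem.List.pyGetD_eq_getElem xs 0 (show (0:Int) ≤ a + (i:Int) by omega)
      (show a + (i:Int) < (xs.length:Int) by omega)]
lemma take_reverse_eq_map_range (xs : List Int) (k : Nat) (s : Int)
    (hs : (k : Int) = s - 1) (hk : k ≤ xs.length) :
    (xs.take k).reverse = (List.range k).map (fun (j : Nat) => PySem.List.pyGetD xs (s - 2 - (j : Int)) 0) := by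
  apply List.ext_getElem
  · simp; omega
  · intro i h1 h2
    have hik : i < k := by simpa using h2
    rw [List.getElem_reverse, List.getElem_take, List.getElem_map, List.getElem_range]
    simp only [List.length_take, Nat.min_eq_left hk]
    simp only [show k - 1 - i = (s - 2 - (i:Int)).toNat from by omega]
    rw [PySem.List.pyGetD_eq_getElem xs 0 (show (0:Int) ≤ s - 2 - (i:Int) by omega)
      (show s - 2 - (i:Int) < (xs.length:Int) by omega)]

-- ===== VERDICT (by name: the statement is the Claim_ definition above) =====
theorem genNextRILI_spec : Claim_equal_genNextRILI := by
  intro inrow stage _ hpre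
  unfold Spec_genNextRILI genNextRILI genNextRILI_alt
  rcases hpre with hle | ⟨h1, hlen⟩ | ⟨h2, hlen⟩
  · -- stage ≤ 0: the riffle part is empty on both sides, equal tail slices
    have hne : stage ≠ 1 := by omega
    simp only [hne, if_false]
    rw [PySem.List.pyRange_one_eq_nil (by omega)]
    have hhu : PySem.Int.floordiv (2 * (stage - 1) + 1) 2 = stage - 1 := by
      rw [PySem.Int.floordiv_eq_ediv_of_pos (by omega)]; omega
    have hnr : max (stage - 1) 0 = 0 := by omega
    rw [hhu, hnr]
    have hright : PySem.List.slice inrow (some stage) (some (stage + 0)) = [] := by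
      apply List.eq_nil_of_length_eq_zero
      rw [PySem.List.length_slice, add_zero]
      omega
    rw [hright]
    simp only [List.foldl_nil, List.nil_append]
    rw [ceilHalf_eq, hhu]
  · -- stage = 1: destructure the two needed cells, both sides compute
    subst h1
    match inrow, hlen with
    | a :: b :: t, _ =>
      norm_num
      rw [show PySem.List.pyRange 0 1 1 = [0] from by decide,
          show pyCeilHalf 1 = 1 from by decide,
          show PySem.List.slice (a :: b :: t) none (some 0) = ([] : List Int) from by
            rw [PySem.List.slice_to _ (by omega)]; rfl,
          show PySem.List.slice (a :: b :: t) (some 1) (some 2) = [b] from by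
            rw [PySem.List.slice_toNat _ (by omega) (by omega)]; rfl]
      simp [List.foldl, pyCeilHalf, PySem.Int.floordiv, PySem.List.pyGetD,
        PySem.List.pyGet?, PySem.List.pyIdx?]
  · -- 2 ≤ stage
    have hne : stage ≠ 1 := by omega
    simp only [hne, if_false]
    set k : Nat := (stage - 1).toNat with hk
    have hks : (k : Int) = stage - 1 := by omega
    have hhu : PySem.Int.floordiv (2 * (stage - 1) + 1) 2 = stage - 1 := by
      rw [PySem.Int.floordiv_eq_ediv_of_pos (by omega)]; omega
    have hnr : max (stage - 1) 0 = stage - 1 := by omega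
    have hnl : max (2 * (stage - 1) - (stage - 1)) 0 = stage - 1 := by omega
    rw [hhu, hnr, hnl]
    -- A's side: loop → flatMap interleave
    rw [PySem.List.pyRange_one 0 (2 * (stage - 1))]
    have hcount : (2 * (stage - 1) - 0).toNat = 2 * k := by omega
    rw [hcount, List.foldl_map, foldl_if_append, List.nil_append]
    simp only [zero_add]
    rw [interleave_core stage (fun i => PySem.List.pyGetD inrow i 0) k]
    -- B's side: slices → gathers, stack fold → riffle
    have hr : stage + (stage - 1) = stage + (k : Int) := by omega
    have hright : PySem.List.slice inrow (some stage) (some (stage + (stage - 1)))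
        = (List.range k).map (fun (j : Nat) => PySem.List.pyGetD inrow (stage + (j : Int)) 0) := by
      rw [hr]; exact slice_eq_map_range inrow stage k (by omega) (by omega)
    have hstack : PySem.List.slice inrow (some (stage - 1 - (stage - 1))) (some (stage - 1))
        = inrow.take k := by
      have : stage - 1 - (stage - 1) = (0 : Int) := by omega
      rw [this]
      simp only [PySem.List.slice_zero_start]
      rw [PySem.List.slice_to inrow (by omega), hk]
    rw [hright, hstack, fold_riffle, List.nil_append,
      take_reverse_eq_map_range inrow k stage hks (by omega),
      riffle_zip _ _ (by simp), List.zip_map', List.flatMap_map]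
    rw [ceilHalf_eq, hhu]
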